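-- pv_equiv track=rewrite | github.com/regular-life/CO-Project | Functions.py | notf
-- ===== SOURCE A (Python) =====
-- def bintodec(a):
--     c = 0
--     for i in range(len(a)):
--         if a[i] == "1":
--             c = 2 ** i
--     return c
--
-- def notf(a):
--     c = ""
--     for i in a:
--         if i == "1":
--             c = c + "0"
--         else:
--             c = c + "1"
--     return bintodec(c)
-- ===== SOURCE B (Python) =====
-- def notf(a):
--     for i in range(len(a) - 1, -1, -1):
--         if a[i] != "1":
--             return 2 ** i
--     return 0
-- ===== Notes on version B (the rewrite author's own statement) =====
-- stated objective: faster
-- what changed: Replaces the invert-string pass plus the forward decode loop with a single reverse scan that returns 2**i at the first (rightmost) index whose character differs from '1', or 0 if the loop finds none.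
import Mathlib
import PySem

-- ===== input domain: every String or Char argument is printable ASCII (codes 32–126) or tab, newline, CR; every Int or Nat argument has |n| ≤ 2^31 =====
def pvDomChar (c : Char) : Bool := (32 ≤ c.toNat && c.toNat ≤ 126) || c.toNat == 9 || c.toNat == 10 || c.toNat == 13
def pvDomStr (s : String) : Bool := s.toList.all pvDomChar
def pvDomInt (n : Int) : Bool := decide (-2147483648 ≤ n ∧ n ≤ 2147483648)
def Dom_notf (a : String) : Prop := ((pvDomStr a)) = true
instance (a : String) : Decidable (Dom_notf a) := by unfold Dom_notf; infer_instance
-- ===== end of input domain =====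

-- B replaces A's invert-string pass plus forward decode loop with one reverse scan
-- returning 2^i at the rightmost non-'1' index (simpler decomposition).

-- ===== PORT A =====
-- helper bintodec, over the chars of the built string
def bintodec (cs : List Char) : Int :=
  (PySem.List.pyRange 0 (cs.length : Int) 1).foldl
    (fun c i => if PySem.List.pyGetD cs i ' ' == '1' then 2 ^ i.toNat else c) 0

def notf (a : String) : Int :=
  bintodec (a.toList.foldl (fun c i => if i == '1' then c ++ ['0'] else c ++ ['1']) [])

-- ===== PORT B =====
-- reverse scan with index: first element of the reversed char list that is not '1' wins
def notfAltGo : List Char → Nat → Int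
  | [], _ => 0
  | c :: rest, i => if c ≠ '1' then 2 ^ i else notfAltGo rest (i - 1)

def notf_alt (a : String) : Int := notfAltGo a.toList.reverse (a.toList.length - 1)

-- ===== PRECONDITION & SPEC =====
def Spec_notf (a : String) (out : Int) : Prop := out = notf_alt a
instance (a : String) (out : Int) : Decidable (Spec_notf a out) := by unfold Spec_notf; infer_instance

-- ===== CLAIM (what is proved, stated in full; the proofs are below) =====
def Claim_equal_notf : Prop := ∀ (a : String), Dom_notf a → Spec_notf a (notf a)

-- ===== LEMMAS AND PROOFS =====

-- A's string-building fold is a map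
theorem notf_build_eq_map (l : List Char) :
    l.foldl (fun c i => if i == '1' then c ++ ['0'] else c ++ ['1']) [] =
      l.map (fun i => if i == '1' then '0' else '1') := by
  have h : (fun (c : List Char) (i : Char) => if i == '1' then c ++ ['0'] else c ++ ['1']) =
      (fun (c : List Char) (i : Char) => c ++ [if i == '1' then '0' else '1']) := by
    funext c i; by_cases h : i == '1' <;> simp [h]
  rw [h]
  simpa using PySem.List.foldl_append_singleton_eq_map
    (fun i : Char => if i == '1' then '0' else '1') l []
-- unrolling bintodec at the right end
theorem bintodec_snoc (m : List Char) (x : Char) :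
    bintodec (m ++ [x]) = if x == '1' then 2 ^ m.length else bintodec m := by
  unfold bintodec
  have hlen : ((m ++ [x]).length : Int) = (m.length : Int) + 1 := by simp
  rw [hlen, PySem.List.pyRange_one_succ_right (by positivity), List.foldl_append]
  have hcong : (PySem.List.pyRange 0 (m.length : Int) 1).foldl
      (fun (c : Int) i => if PySem.List.pyGetD (m ++ [x]) i ' ' == '1' then 2 ^ i.toNat else c) (0 : Int) =
      (PySem.List.pyRange 0 (m.length : Int) 1).foldl
      (fun (c : Int) i => if PySem.List.pyGetD m i ' ' == '1' then 2 ^ i.toNat else c) (0 : Int) := by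
    apply PySem.List.foldl_congr_mem
    intro acc i hi
    rw [PySem.List.mem_pyRange_one] at hi
    have hx : PySem.List.pyGetD (m ++ [x]) i ' ' = PySem.List.pyGetD m i ' ' := by
      rw [PySem.List.pyGetD_eq_getElem (m ++ [x]) ' ' hi.1 (by simp; omega),
          PySem.List.pyGetD_eq_getElem m ' ' hi.1 (by omega)]
      rw [List.getElem_append_left]
    rw [hx]
  have hget : PySem.List.pyGetD (m ++ [x]) (m.length : Int) ' ' = x := by
    rw [PySem.List.pyGetD_eq_getElem (m ++ [x]) ' ' (by positivity) (by simp)]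
    simp
  simp only [List.foldl_cons, List.foldl_nil]
  rw [hget]
  by_cases h : x = '1'
  · simp [h]
  · simp only [show (x == '1') = false by simp [h], Bool.false_eq_true, if_false]
    exact hcong
-- the main bridge, by induction from the right
theorem main_bridge (l : List Char) :
    bintodec (l.map (fun i => if i == '1' then '0' else '1')) =
      notfAltGo l.reverse (l.length - 1) := by
  induction l using List.reverseRecOn with
  | nil => simp [bintodec, notfAltGo, PySem.List.pyRange]
  | append_singleton l x ih =>
    rw [List.map_append, List.map_singleton, bintodec_snoc, List.reverse_append]
    simp only [List.reverse_singleton, List.singleton_append, List.length_append,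
      List.length_singleton, List.length_map]
    rw [show l.length + 1 - 1 = l.length from rfl]
    unfold notfAltGo
    by_cases h : x = '1'
    · simp only [h]
      simpa using ih
    · simp [h]
theorem notf_eq (a : String) : notf a = notf_alt a := by
  unfold notf notf_alt
  rw [notf_build_eq_map, main_bridge]

-- ===== VERDICT (by name: the statement is the Claim_ definition above) =====
theorem notf_spec : Claim_equal_notf := by
  intro a _
  unfold Spec_notf
  exact notf_eq a
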